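-- pv_equiv track=rewrite | github.com/oda-p/hooong_algo | baekjoon/1644.py | solution
-- ===== SOURCE A (Python) =====
-- def solution(n):
--     if n == 1:
--         return 0
--
--     # 에라토스테네스의 체 이용 (소수 구하기)
--     prime_nums = []
--     numbers = [False for _ in range(n + 1)]
--     for i in range(2, n + 1):
--         if numbers[i]:
--             continue
--
--         prime_nums.append(i)
--         tmp = i
--         while tmp <= n:
--             numbers[tmp] = True
--             tmp += i
--
--     # 투포인터로 연속된 합 구하기
--     i, j = 0, 0
--     sum_num = prime_nums[0]
--     cnt = 0
--     while j < len(prime_nums):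
--         if sum_num <= n:
--             if sum_num == n:
--                 cnt += 1
--
--             j += 1
--             if j == len(prime_nums):
--                 break
--             sum_num += prime_nums[j]
--         else:
--             if i < j:
--                 sum_num -= prime_nums[i]
--                 i += 1
--             else:
--                 j += 1
--                 if j == len(prime_nums):
--                     break
--                 sum_num += prime_nums[j]
--
--     while i < j:
--         sum_num -= prime_nums[i]
--
--         if sum_num == n:
--             cnt += 1
--
--         i += 1
--         if i == j:
--             break
--
--     return cnt
-- ===== SOURCE B (Python) =====
-- def solution(n):
--     # same Eratosthenes sieve as A to collect the primes
--     prime_nums = []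
--     numbers = [False for _ in range(n + 1)]
--     for i in range(2, n + 1):
--         if numbers[i]:
--             continue
--         prime_nums.append(i)
--         tmp = i
--         while tmp <= n:
--             numbers[tmp] = True
--             tmp += i
--
--     # prefix sums of the primes (strictly increasing, since primes are positive)
--     ps = [0]
--     for p in prime_nums:
--         ps.append(ps[-1] + p)
--
--     # a window of consecutive primes sums to n  iff  ps[b] - n is some earlier prefix sum;
--     # find it by binary search in the sorted prefix ps[0:b]
--     cnt = 0
--     for b in range(1, len(ps)):
--         target = ps[b] - n
--         lo, hi = 0, b
--         while lo < hi:
--             mid = (lo + hi) // 2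
--             if ps[mid] < target:
--                 lo = mid + 1
--             else:
--                 hi = mid
--         if lo < b and ps[lo] == target:
--             cnt += 1
--     return cnt
-- ===== Notes on version B (the rewrite author's own statement) =====
-- stated objective: alternative
-- what changed: The two-pointer sliding-window scan over the primes (two while loops with shrink/grow cases) is replaced by building the prefix-sum list of the primes and, for each window end b, binary-searching the sorted prefix ps[0:b] for ps[b] - n; the Eratosthenes sieve is kept.
import Mathlib
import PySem

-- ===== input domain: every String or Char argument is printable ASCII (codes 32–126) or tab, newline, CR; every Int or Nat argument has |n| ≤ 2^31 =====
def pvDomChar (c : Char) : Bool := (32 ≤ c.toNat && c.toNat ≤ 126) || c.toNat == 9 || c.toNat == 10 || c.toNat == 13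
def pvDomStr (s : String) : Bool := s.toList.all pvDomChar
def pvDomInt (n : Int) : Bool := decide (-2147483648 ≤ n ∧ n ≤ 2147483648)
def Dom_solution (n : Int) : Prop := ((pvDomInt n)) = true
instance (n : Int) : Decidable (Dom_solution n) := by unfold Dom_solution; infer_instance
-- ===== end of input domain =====

-- B replaces A's two-pointer sliding-window scan over the primes by a prefix-sum array and,
-- for each window end, a binary search for the matching earlier prefix sum; the sieve is kept.
-- A raises IndexError for n ≤ 0 (prime_nums[0] on an empty list); those inputs are outside Pre_.
-- Python lists are ported as Lean Arrays (index/append are O(1) in both).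

-- ===== PORT A =====
-- inner 'while tmp <= n: numbers[tmp] = True; tmp += i' (fuel is a totality guard; the loop runs
-- at most n times since every call has step i ≥ 2, so fuel (n+1).toNat never runs out; the
-- assignment index tmp is within range(n+1) on every call, so setIfInBounds is exact)
def pvMark (fuel : Nat) (numbers : Array Bool) (tmp i n : Int) : Array Bool :=
  match fuel with
  | 0 => numbers
  | fuel + 1 =>
    if tmp ≤ n then pvMark fuel (numbers.setIfInBounds tmp.toNat true) (tmp + i) i n
    else numbers

-- body of 'for i in range(2, n + 1)': skip if marked, else append i and mark its multiples
-- (the read numbers[i] has 2 ≤ i ≤ n < len(numbers), so getD is exact)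
def pvSieveStep (n : Int) (st : Array Bool × Array Int) (i : Int) : Array Bool × Array Int :=
  if st.1.getD i.toNat false then st
  else (pvMark (n + 1).toNat st.1 i i n, st.2.push i)

-- the Eratosthenes sieve both Pythons share, returning prime_nums
def pvSievePrimes (n : Int) : Array Int :=
  ((PySem.List.pyRange 2 (n + 1) 1).foldl (pvSieveStep n)
    (Array.replicate (n + 1).toNat false, #[])).2

-- second 'while i < j' loop of A
def pvLoop2 (p : Array Int) (n : Int) (i j : Nat) (sum cnt : Int) : Int :=
  if _h : i < j then
    let sum' := sum - p.getD i 0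
    let cnt' := if sum' = n then cnt + 1 else cnt
    if i + 1 = j then cnt'
    else pvLoop2 p n (i + 1) j sum' cnt'
  else cnt
termination_by j - i

-- first 'while j < len(prime_nums)' loop of A; on a break it falls through to pvLoop2 (fuel is a totality guard)
def pvLoop1 (p : Array Int) (n : Int) (fuel : Nat) (i j : Nat) (sum cnt : Int) : Int :=
  match fuel with
  | 0 => cnt
  | fuel + 1 =>
    if j < p.size then
      if sum ≤ n then
        let cnt' := if sum = n then cnt + 1 else cnt
        if j + 1 = p.size then pvLoop2 p n i (j + 1) sum cnt'
        else pvLoop1 p n fuel i (j + 1) (sum + p.getD (j + 1) 0) cnt'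
      else
        if i < j then pvLoop1 p n fuel (i + 1) j (sum - p.getD i 0) cnt
        else
          if j + 1 = p.size then pvLoop2 p n i (j + 1) sum cnt
          else pvLoop1 p n fuel i (j + 1) (sum + p.getD (j + 1) 0) cnt
    else pvLoop2 p n i j sum cnt

def solution (n : Int) : Int :=
  if n = 1 then 0
  else
    let p := pvSievePrimes n
    if p.size = 0 then 0   -- Python raises IndexError at prime_nums[0]; these inputs are outside Pre_solution
    else pvLoop1 p n (2 * p.size + 2) 0 0 (p.getD 0 0) 0

-- ===== PORT B =====
-- body of 'for p in prime_nums: ps.append(ps[-1] + p)' (ps is never empty, so ps[-1] = ps[len-1])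
def pvPsStep (a : Array Int) (q : Int) : Array Int := a.push (a.getD (a.size - 1) 0 + q)

-- the prefix-sum list ps
def pvPsArr (p : Array Int) : Array Int := p.foldl pvPsStep #[0]

-- 'while lo < hi: mid = (lo + hi) // 2; …' binary search for target in ps[lo:hi]
-- (fuel is a totality guard: hi - lo shrinks every step, so fuel hi + 1 never runs out)
def pvBisect (fuel : Nat) (ps : Array Int) (target : Int) (lo hi : Nat) : Nat :=
  match fuel with
  | 0 => lo
  | fuel + 1 =>
    if lo < hi then
      let mid := (lo + hi) / 2
      if ps.getD mid 0 < target then pvBisect fuel ps target (mid + 1) hi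
      else pvBisect fuel ps target lo mid
    else lo

-- 'for b in range(1, len(ps)): …' (all reads ps[b], ps[lo] have index ≤ b < len(ps), so getD is exact)
def solution_alt (n : Int) : Int :=
  let p := pvSievePrimes n
  let ps := pvPsArr p
  (PySem.List.pyRange 1 (ps.size : Int) 1).foldl
    (fun cnt b =>
      let target := ps.getD b.toNat 0 - n
      let lo := pvBisect (b.toNat + 1) ps target 0 b.toNat
      if lo < b.toNat ∧ ps.getD lo 0 = target then cnt + 1 else cnt) 0

-- ===== PRECONDITION & SPEC =====
-- Pre_ excludes n ≤ 0, where A raises IndexError (prime_nums[0] on an empty prime list)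
def Pre_solution (n : Int) : Prop := 1 ≤ n
instance (n : Int) : Decidable (Pre_solution n) := by unfold Pre_solution; infer_instance
def pvWitness_solution : Int := 5

def Spec_solution (n : Int) (out : Int) : Prop := out = solution_alt n
instance (n : Int) (out : Int) : Decidable (Spec_solution n out) := by unfold Spec_solution; infer_instance

-- ===== CLAIM (what is proved, stated in full; the proofs are below) =====
def Claim_equal_solution : Prop := ∀ (n : Int), Dom_solution n → Pre_solution n → Spec_solution n (solution n)

-- ===== LEMMAS AND PROOFS =====

-- prefix sums of the prime list
def pvPsum (p : List Int) (k : Nat) : Int := ((p.take k).sum)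

-- 'window ending at b sums to n': ∃ a < b with psum b - psum a = n
def pvWinB (p : List Int) (n : Int) (b : Nat) : Bool :=
  (List.range b).any (fun a => decide (pvPsum p a = pvPsum p b - n))

-- number of windows with right end ≤ j
def pvWinsUp (p : List Int) (n : Int) (j : Nat) : Nat :=
  (List.range j).countP (fun t => pvWinB p n (t + 1))

-- Array.getD of an in-range index, on the toList side
lemma pvAGet (q : Array Int) (k : Nat) (h : k < q.size) :
    q.getD k 0 = q.toList[k]'(by simpa using h) := by
  simp [Array.getD, h]

lemma pvPsum_succ (p : List Int) (k : Nat) (hk : k < p.length) :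
    pvPsum p (k + 1) = pvPsum p k + p[k] := by
  unfold pvPsum
  exact List.sum_take_succ p k hk

lemma pvPsum_mono (p : List Int) (hpos : ∀ x ∈ p, 0 < x) {a b : Nat}
    (hab : a ≤ b) (hb : b ≤ p.length) : pvPsum p a ≤ pvPsum p b := by
  induction b with
  | zero =>
    have : a = 0 := by omega
    simp [this]
  | succ b ih =>
    rcases Nat.lt_or_ge a (b + 1) with h | h
    · have hb' : b < p.length := by omega
      have h2 := hpos p[b] (List.getElem_mem hb')
      rw [pvPsum_succ p b hb']
      have h3 := ih (by omega) (by omega)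
      omega
    · have : a = b + 1 := by omega
      simp [this]

lemma pvPsum_strict (p : List Int) (hpos : ∀ x ∈ p, 0 < x) {a b : Nat}
    (hab : a < b) (hb : b ≤ p.length) : pvPsum p a < pvPsum p b := by
  have hb' : b - 1 < p.length := by omega
  have h1 : pvPsum p a ≤ pvPsum p (b - 1) := pvPsum_mono p hpos (by omega) (by omega)
  have h2 : pvPsum p (b - 1 + 1) = pvPsum p (b - 1) + p[b - 1] := pvPsum_succ p (b - 1) hb'
  have h3 := hpos p[b - 1] (List.getElem_mem hb')
  have hb1 : b - 1 + 1 = b := by omega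
  rw [hb1] at h2
  omega

lemma pvWinsUp_succ (p : List Int) (n : Int) (j : Nat) :
    pvWinsUp p n (j + 1) = pvWinsUp p n j + (if pvWinB p n (j + 1) then 1 else 0) := by
  unfold pvWinsUp
  rw [List.range_succ, List.countP_append]
  by_cases h : pvWinB p n (j + 1) = true <;> simp [h]

lemma pvWinB_true_iff (p : List Int) (n : Int) (b : Nat) :
    pvWinB p n b = true ↔ ∃ a < b, pvPsum p a = pvPsum p b - n := by
  simp only [pvWinB, List.any_eq_true, List.mem_range, decide_eq_true_eq]

-- sieve elements are positive
lemma pvSieve_fold_pos (n : Int) :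
    ∀ (l : List Int), (∀ i ∈ l, 0 < i) → ∀ (st : Array Bool × Array Int),
      (∀ x ∈ st.2.toList, 0 < x) → ∀ x ∈ (l.foldl (pvSieveStep n) st).2.toList, 0 < x := by
  intro l
  induction l with
  | nil => intro _ st hst x hx; simpa using hst x hx
  | cons i l ih =>
    intro hl st hst
    have hi : 0 < i := hl i (by simp)
    have hl' : ∀ j ∈ l, 0 < j := fun j hj => hl j (by simp [hj])
    simp only [List.foldl_cons]
    apply ih hl'
    unfold pvSieveStep
    split
    · exact hst
    · intro x hx
      simp only [Array.toList_push] at hx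
      rcases List.mem_append.mp hx with h | h
      · exact hst x h
      · simp at h; omega

lemma pvSievePrimes_pos (n : Int) : ∀ x ∈ (pvSievePrimes n).toList, 0 < x := by
  unfold pvSievePrimes
  apply pvSieve_fold_pos
  · intro i hi
    have := (PySem.List.mem_pyRange_one.mp hi).1
    omega
  · simp

-- ===== B-side: the prefix-sum array is the list of prefix sums =====
lemma pvPsArr_build (full : List Int) :
    ∀ (k : Nat) (a : Array Int), k ≤ full.length →
      a.toList = (List.range (k + 1)).map (pvPsum full) →
      ((full.drop k).foldl pvPsStep a).toList
        = (List.range (full.length + 1)).map (pvPsum full) := by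
  intro k
  induction hm : full.length - k generalizing k with
  | zero =>
    intro a hk ha
    have hkL : k = full.length := by omega
    subst hkL
    simpa [List.drop_length] using ha
  | succ m ih =>
    intro a hk ha
    have hklt : k < full.length := by omega
    rw [List.drop_eq_getElem_cons hklt]
    simp only [List.foldl_cons]
    apply ih (k + 1) (by omega) _ (by omega)
    have hsize : a.size = k + 1 := by
      have := congrArg List.length ha
      simpa using this
    have hk1 : a.size - 1 = k := by omega
    have hidx : a.size - 1 < a.toList.length := by
      rw [Array.length_toList]; omega
    have hlast : a.getD (a.size - 1) 0 = pvPsum full k := by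
      rw [pvAGet a (a.size - 1) (by omega), List.getElem_of_eq ha hidx]
      simp only [List.getElem_map, List.getElem_range]
      rw [hk1]
    unfold pvPsStep
    rw [Array.toList_push, ha, hlast, List.range_succ (n := k + 1), List.map_append]
    simp [pvPsum_succ full k hklt]

lemma pvPsArr_toList (p : Array Int) :
    (pvPsArr p).toList = (List.range (p.toList.length + 1)).map (pvPsum p.toList) := by
  unfold pvPsArr
  rw [← Array.foldl_toList]
  have := pvPsArr_build p.toList 0 #[0] (by omega)
    (by simp [pvPsum])
  simpa using this

lemma pvPsArr_size (p : Array Int) : (pvPsArr p).size = p.toList.length + 1 := by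
  have := congrArg List.length (pvPsArr_toList p)
  simpa using this

lemma pvPsArr_get (p : Array Int) (k : Nat) (hk : k ≤ p.toList.length) :
    (pvPsArr p).getD k 0 = pvPsum p.toList k := by
  have hsz : k < (pvPsArr p).size := by rw [pvPsArr_size]; omega
  have hidx : k < (pvPsArr p).toList.length := by rw [Array.length_toList]; omega
  rw [pvAGet (pvPsArr p) k hsz, List.getElem_of_eq (pvPsArr_toList p) hidx]
  simp only [List.getElem_map, List.getElem_range]

-- ===== B-side: binary-search correctness on the (monotone) prefix sums =====
lemma pvBisect_spec (ps : Array Int) (t : Int) (b : Nat)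
    (hmono : ∀ x y : Nat, x ≤ y → y ≤ b → ps.getD x 0 ≤ ps.getD y 0) :
    ∀ (fuel lo hi : Nat), lo ≤ hi → hi ≤ b → hi - lo < fuel →
      (∀ idx, idx < lo → ps.getD idx 0 < t) →
      (∀ idx, hi ≤ idx → idx < b → t ≤ ps.getD idx 0) →
      lo ≤ pvBisect fuel ps t lo hi ∧ pvBisect fuel ps t lo hi ≤ hi ∧
      (∀ idx, idx < pvBisect fuel ps t lo hi → ps.getD idx 0 < t) ∧
      (∀ idx, pvBisect fuel ps t lo hi ≤ idx → idx < b → t ≤ ps.getD idx 0) := by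
  intro fuel
  induction fuel with
  | zero => intro lo hi _ _ h; omega
  | succ fuel ih =>
    intro lo hi hlohi hhib hfuel hlow hhigh
    unfold pvBisect
    by_cases h : lo < hi
    · rw [if_pos h]
      by_cases hmid : ps.getD ((lo + hi) / 2) 0 < t
      · rw [if_pos hmid]
        have := ih ((lo + hi) / 2 + 1) hi (by omega) hhib (by omega)
          (by
            intro idx hidx
            rcases Nat.lt_or_ge idx lo with h' | h'
            · exact hlow idx h'
            · exact lt_of_le_of_lt (hmono idx ((lo + hi) / 2) (by omega) (by omega)) hmid)
          hhigh
        exact ⟨by omega, by omega, this.2.2.1, this.2.2.2⟩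
      · rw [if_neg hmid]
        have := ih lo ((lo + hi) / 2) (by omega) (by omega) (by omega) hlow
          (by
            intro idx hidx hidxb
            have h1 : ps.getD ((lo + hi) / 2) 0 ≤ ps.getD idx 0 := hmono _ idx hidx (by omega)
            omega)
        exact ⟨this.1, by omega, this.2.2.1, this.2.2.2⟩
    · rw [if_neg h]
      exact ⟨le_refl _, by omega, hlow, by
        intro idx hidx hidxb
        exact hhigh idx (by omega) hidxb⟩

-- per window end b: the search-and-compare test is exactly pvWinB
lemma pvTest_iff (p : Array Int) (n : Int) (b : Nat) (hb : 1 ≤ b) (hbL : b ≤ p.toList.length)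
    (hpos : ∀ x ∈ p.toList, 0 < x) :
    ((pvBisect (b + 1) (pvPsArr p) ((pvPsArr p).getD b 0 - n) 0 b < b ∧
      (pvPsArr p).getD (pvBisect (b + 1) (pvPsArr p) ((pvPsArr p).getD b 0 - n) 0 b) 0
        = (pvPsArr p).getD b 0 - n)
      ↔ pvWinB p.toList n b = true) := by
  set t := (pvPsArr p).getD b 0 - n with ht
  have hmono : ∀ x y : Nat, x ≤ y → y ≤ b → (pvPsArr p).getD x 0 ≤ (pvPsArr p).getD y 0 := by
    intro x y hxy hyb
    rw [pvPsArr_get p x (by omega), pvPsArr_get p y (by omega)]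
    exact pvPsum_mono p.toList hpos hxy (by omega)
  have hspec := pvBisect_spec (pvPsArr p) t b hmono (b + 1) 0 b (by omega) (le_refl _)
    (by omega) (by omega) (by intro idx h1 h2; omega)
  set r := pvBisect (b + 1) (pvPsArr p) t 0 b with hr
  rw [pvWinB_true_iff]
  have hgb : (pvPsArr p).getD b 0 = pvPsum p.toList b := pvPsArr_get p b hbL
  constructor
  · rintro ⟨hrb, hreq⟩
    refine ⟨r, hrb, ?_⟩
    rw [← pvPsArr_get p r (by omega), hreq, ← hgb]
  · rintro ⟨a, hab, haeq⟩
    have hga : (pvPsArr p).getD a 0 = pvPsum p.toList a := pvPsArr_get p a (by omega)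
    have hat : (pvPsArr p).getD a 0 = t := by rw [hga, ht, hgb]; exact haeq
    have hra : r ≤ a := by
      by_contra hlt
      have := hspec.2.2.1 a (by omega)
      omega
    have hrb : r < b := by omega
    refine ⟨hrb, ?_⟩
    have h1 : t ≤ (pvPsArr p).getD r 0 := hspec.2.2.2 r (le_refl _) hrb
    have h2 : (pvPsArr p).getD r 0 ≤ (pvPsArr p).getD a 0 := hmono r a hra (by omega)
    omega

-- B computes the total window count
lemma pvAltEq (n : Int) :
    solution_alt n = (pvWinsUp (pvSievePrimes n).toList n (pvSievePrimes n).toList.length : Int) := by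
  unfold solution_alt
  dsimp only
  set p := pvSievePrimes n with hp
  set L := p.toList.length with hL
  have hpos := pvSievePrimes_pos n
  rw [← hp] at hpos
  have hsz : ((pvPsArr p).size : Int) = (L : Int) + 1 := by
    rw [pvPsArr_size, hL]; push_cast; ring
  rw [hsz, PySem.List.foldl_ite_add_one, PySem.List.pyRange_one]
  have harg : ((L : Int) + 1 - 1).toNat = L := by omega
  rw [harg, List.countP_map]
  have hwU : (pvWinsUp p.toList n L : Int) = ((List.range L).countP (fun t => pvWinB p.toList n (t + 1)) : Int) := by
    rw [pvWinsUp]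
  rw [hwU]
  norm_cast
  simp only [Nat.zero_add]
  apply List.countP_congr
  intro t ht
  have htL : t < L := List.mem_range.mp ht
  simp only [Function.comp_apply, Int.toNat_natCast]
  rw [Nat.add_comm 1 t]
  have hiff := pvTest_iff p n (t + 1) (by omega) (by omega) hpos
  cases hw : pvWinB p.toList n (t + 1)
  · simp only [decide_eq_true_eq]
    constructor
    · intro hX
      have h2 := hiff.mp hX
      rw [hw] at h2
      exact h2
    · intro h
      exact absurd h (by simp)
  · simp only [decide_eq_true_eq]
    exact iff_of_true (hiff.mpr hw) trivial

-- ===== A-side: the two-pointer loops count exactly the windows =====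
lemma pvLoop2_eq (p : Array Int) (n : Int) :
    ∀ (i : Nat) (sum cnt : Int),
      i ≤ p.size →
      sum = pvPsum p.toList p.size - pvPsum p.toList i →
      (∀ a, i < a → a ≤ p.size → pvPsum p.toList p.size - pvPsum p.toList a ≠ n) →
      pvLoop2 p n i p.size sum cnt = cnt := by
  intro i
  induction hm : p.size - i generalizing i with
  | zero =>
    intro sum cnt hle hsum hinv
    unfold pvLoop2
    rw [dif_neg (by omega)]
  | succ m ih =>
    intro sum cnt hle hsum hinv
    have hlt : i < p.size := by omega
    unfold pvLoop2
    rw [dif_pos hlt]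
    have hget : p.getD i 0 = p.toList[i]'(by simpa using hlt) := pvAGet p i hlt
    have hsum' : sum - p.getD i 0 = pvPsum p.toList p.size - pvPsum p.toList (i + 1) := by
      rw [hget, hsum, pvPsum_succ p.toList i (by simpa using hlt)]; ring
    have hne : ¬ (sum - p.getD i 0 = n) := by
      rw [hsum']
      exact hinv (i + 1) (by omega) (by omega)
    simp only [hne, if_false]
    by_cases hij : i + 1 = p.size
    · rw [if_pos hij]
    · rw [if_neg hij]
      exact ih (i + 1) (by omega) _ _ (by omega) hsum'
        (fun a ha ha' => hinv a (by omega) ha')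

lemma pvLoop1_eq (p : Array Int) (n : Int) (hpos : ∀ x ∈ p.toList, 0 < x) (hn : 2 ≤ n) :
    ∀ (fuel i j : Nat) (sum cnt : Int),
      i ≤ j → j < p.size →
      2 * p.size - i - j ≤ fuel →
      sum = pvPsum p.toList (j + 1) - pvPsum p.toList i →
      cnt = (pvWinsUp p.toList n j : Int) →
      (∀ a, a < i → n < pvPsum p.toList (j + 1) - pvPsum p.toList a) →
      pvLoop1 p n fuel i j sum cnt = (pvWinsUp p.toList n p.size : Int) := by
  intro fuel
  induction fuel with
  | zero =>
    intro i j sum cnt hij hj hfuel _ _ _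
    omega
  | succ fuel ih =>
    intro i j sum cnt hij hj hfuel hsum hcnt hptr
    have hLL : p.toList.length = p.size := by simp
    unfold pvLoop1
    rw [if_pos hj]
    have hgetj : ∀ (k : Nat) (h : k < p.size),
        p.getD k 0 = p.toList[k]'(by simpa using h) := fun k h => pvAGet p k h
    by_cases hle : sum ≤ n
    · rw [if_pos hle]
      -- window (i, j+1) is the only candidate ending at j+1
      have hwin : pvWinB p.toList n (j + 1) = true ↔ sum = n := by
        rw [pvWinB_true_iff]
        constructor
        · rintro ⟨a, ha, hA⟩
          rcases Nat.lt_or_ge a i with h' | h'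
          · have := hptr a h'
            omega
          · have h1 : pvPsum p.toList i ≤ pvPsum p.toList a := pvPsum_mono p.toList hpos h' (by omega)
            omega
        · intro h
          exact ⟨i, by omega, by omega⟩
      have hcnt' : (if sum = n then cnt + 1 else cnt) = (pvWinsUp p.toList n (j + 1) : Int) := by
        rw [pvWinsUp_succ]
        by_cases h : sum = n
        · rw [if_pos h, hcnt]
          have hT : pvWinB p.toList n (j + 1) = true := hwin.mpr h
          rw [hT]
          simp
        · rw [if_neg h, hcnt]
          have : pvWinB p.toList n (j + 1) = false := by
            cases h' : pvWinB p.toList n (j + 1)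
            · rfl
            · exact absurd (hwin.mp h') h
          rw [this]; simp
      by_cases hjl : j + 1 = p.size
      · rw [if_pos hjl]
        rw [hcnt', hjl]
        apply pvLoop2_eq p n i sum _ (by omega)
        · rw [hsum, hjl]
        · intro a ha ha'
          have h1 : pvPsum p.toList i < pvPsum p.toList a := pvPsum_strict p.toList hpos ha (by omega)
          have h2 : pvPsum p.toList (j + 1) = pvPsum p.toList p.size := by rw [hjl]
          omega
      · rw [if_neg hjl]
        have hjl' : j + 1 < p.size := by omega
        apply ih i (j + 1) _ _ (by omega) hjl' (by omega)
        · rw [hgetj (j + 1) hjl', hsum, pvPsum_succ p.toList (j + 1) (by omega)]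
          ring
        · exact hcnt'
        · intro a ha
          have h1 := hptr a ha
          have h2 := hpos (p.toList[j + 1]'(by omega)) (List.getElem_mem (by omega))
          rw [pvPsum_succ p.toList (j + 1) (by omega)]
          omega
    · rw [if_neg hle]
      have hgt : n < sum := by omega
      by_cases hij' : i < j
      · rw [if_pos hij']
        apply ih (i + 1) j _ _ (by omega) hj (by omega)
        · rw [hgetj i (by omega), hsum, pvPsum_succ p.toList i (by omega)]; ring
        · exact hcnt
        · intro a ha
          rcases Nat.lt_or_ge a i with h' | h'
          · exact hptr a h'
          · have : a = i := by omega
            subst this; omega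
      · rw [if_neg hij']
        have hieq : i = j := by omega
        -- no window ends at j+1
        have hwinF : pvWinB p.toList n (j + 1) = false := by
          cases h' : pvWinB p.toList n (j + 1)
          · rfl
          · exfalso
            rcases (pvWinB_true_iff p.toList n (j + 1)).mp h' with ⟨a, ha, hA⟩
            have h1 : pvPsum p.toList a ≤ pvPsum p.toList j := pvPsum_mono p.toList hpos (by omega) (by omega)
            rw [← hieq] at h1
            omega
        have hcnt2 : cnt = (pvWinsUp p.toList n (j + 1) : Int) := by
          rw [pvWinsUp_succ, hwinF, hcnt]; simp
        by_cases hjl : j + 1 = p.size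
        · rw [if_pos hjl]
          rw [hcnt2, hjl]
          apply pvLoop2_eq p n i sum _ (by omega)
          · rw [hsum, hjl]
          · intro a ha ha'
            have haL : a = p.size := by omega
            subst haL
            omega
        · rw [if_neg hjl]
          have hjl' : j + 1 < p.size := by omega
          apply ih i (j + 1) _ _ (by omega) hjl' (by omega)
          · rw [hgetj (j + 1) hjl', hsum, pvPsum_succ p.toList (j + 1) (by omega)]
            ring
          · exact hcnt2
          · intro a ha
            have h1 := hptr a ha
            have h2 := hpos (p.toList[j + 1]'(by omega)) (List.getElem_mem (by omega))
            rw [pvPsum_succ p.toList (j + 1) (by omega)]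
            omega

-- ===== VERDICT (by name: the statement is the Claim_ definition above) =====
theorem solution_spec : Claim_equal_solution := by
  intro n _ hpre
  unfold Spec_solution
  by_cases h1 : n = 1
  · subst h1; decide
  · have hn : 2 ≤ n := by
      unfold Pre_solution at hpre; omega
    unfold solution
    rw [if_neg h1]
    rw [pvAltEq n]
    have hpos := pvSievePrimes_pos n
    have hLL : (pvSievePrimes n).toList.length = (pvSievePrimes n).size := by simp
    by_cases hz : (pvSievePrimes n).size = 0
    · rw [if_pos hz]
      rw [hLL, hz]
      simp [pvWinsUp]
    · rw [if_neg hz]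
      rw [hLL]
      apply pvLoop1_eq (pvSievePrimes n) n hpos hn _ 0 0 _ _ (by omega) (by omega) (by omega)
      · rw [pvAGet (pvSievePrimes n) 0 (by omega)]
        rw [show (1 : Nat) = 0 + 1 from rfl, pvPsum_succ (pvSievePrimes n).toList 0 (by omega)]
        simp [pvPsum]
      · simp [pvWinsUp]
      · intro a ha; omega
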